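-- pv_equiv track=rewrite | github.com/Tol-D/BYTEEYE | Code/Core/Training/Features_Extract.py | rule_SUB2
-- ===== SOURCE A (Python) =====
-- def rule_SUB2(block,edges):
--     judge1 = False
--     judge2 = False
--     ra = 0
--     for t in block['bytecode'].split('\''):
--         if t == '54':  # SLOAD
--             judge1 = True
--             continue
--         if judge1 and t == '03':  # SUB
--             judge2 = True
--             continue
--         if judge1 and judge2 and t == '55':  # SSTORE
--             ra = 1
--     return ra
-- ===== SOURCE B (Python) =====
-- def rule_SUB2(block, edges):
--     toks = block['bytecode'].split('\'')
--     try: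
--         i = toks.index('54')
--         j = toks.index('03', i + 1)
--         toks.index('55', j + 1)
--         return 1
--     except ValueError:
--         return 0
-- ===== Notes on version B (the rewrite author's own statement) =====
-- stated objective: simpler
-- what changed: Replaced the boolean flag-based state machine over all tokens with three chained first-occurrence searches (index with start offsets) inside a try/except, returning 1 on success and 0 on ValueError.
import Mathlib
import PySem

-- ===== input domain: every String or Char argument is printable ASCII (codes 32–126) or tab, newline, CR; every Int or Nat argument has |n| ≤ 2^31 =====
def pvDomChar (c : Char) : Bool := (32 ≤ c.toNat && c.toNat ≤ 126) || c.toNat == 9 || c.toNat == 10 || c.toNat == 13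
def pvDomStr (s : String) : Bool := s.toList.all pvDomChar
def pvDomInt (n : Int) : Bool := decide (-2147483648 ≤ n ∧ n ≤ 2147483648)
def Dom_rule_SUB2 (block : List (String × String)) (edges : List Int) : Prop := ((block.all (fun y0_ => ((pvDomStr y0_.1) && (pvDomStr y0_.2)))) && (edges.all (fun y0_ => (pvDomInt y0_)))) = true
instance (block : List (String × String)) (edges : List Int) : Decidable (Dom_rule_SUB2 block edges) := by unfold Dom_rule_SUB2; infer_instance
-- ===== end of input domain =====

-- B replaces A's flag-based state machine by three chained first-occurrence searches; objective: simpler.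
-- Note: Python A raises KeyError when block has no 'bytecode' key; Pre_ excludes exactly that (B raises there too).


-- ===== PORT A =====
-- loop body of A: state (judge1, judge2, ra)
def stepA (st : Bool × Bool × Int) (t : String) : Bool × Bool × Int :=
  if t = "54" then (true, st.2.1, st.2.2)
  else if st.1 && decide (t = "03") then (st.1, true, st.2.2)
  else if st.1 && st.2.1 && decide (t = "55") then (st.1, st.2.1, 1)
  else st

def rule_SUB2 (block : List (String × String)) (edges : List Int) : Int :=
  -- block['bytecode']: exact under Pre_ (key present; Python raises KeyError otherwise)
  let s := (PySem.Dict.ofList block).getD "bytecode" ""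
  (((PySem.Str.split? s "'").getD []).foldl stepA (false, false, 0)).2.2

-- ===== PORT B =====
def rule_SUB2_alt (block : List (String × String)) (edges : List Int) : Int :=
  let s := (PySem.Dict.ofList block).getD "bytecode" ""
  let toks := (PySem.Str.split? s "'").getD []
  match PySem.List.index? toks "54" with
  | none => 0                                   -- ValueError
  | some i =>
    match PySem.List.index? (toks.drop (i + 1)) "03" with   -- toks.index('03', i+1)
    | none => 0
    | some jr =>
      let j := i + 1 + jr
      match PySem.List.index? (toks.drop (j + 1)) "55" with -- toks.index('55', j+1)
      | none => 0
      | some _ => 1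

-- ===== PRECONDITION & SPEC =====
-- Pre_ excludes blocks without a 'bytecode' key: there Python A raises KeyError (and B raises too).
def Pre_rule_SUB2 (block : List (String × String)) (edges : List Int) : Prop :=
  "bytecode" ∈ block.map Prod.fst
instance (block : List (String × String)) (edges : List Int) : Decidable (Pre_rule_SUB2 block edges) := by unfold Pre_rule_SUB2; infer_instance

def pvWitness_rule_SUB2 : (List (String × String)) × List Int := ([("bytecode", "60'54'03'55")], [])

def Spec_rule_SUB2 (block : List (String × String)) (edges : List Int) (out : Int) : Prop := out = rule_SUB2_alt block edges
instance (block : List (String × String)) (edges : List Int) (out : Int) : Decidable (Spec_rule_SUB2 block edges out) := by unfold Spec_rule_SUB2; infer_instance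

-- ===== CLAIM (what is proved, stated in full; the proofs are below) =====
def Claim_equal_rule_SUB2 : Prop := ∀ (block : List (String × String)) (edges : List Int), Dom_rule_SUB2 block edges → Pre_rule_SUB2 block edges → Spec_rule_SUB2 block edges (rule_SUB2 block edges)

-- ===== LEMMAS AND PROOFS =====

-- state (false,false,ra) is preserved while no '54' is seen
lemma foldFF_no54 (l : List String) (ra : Int) (h : "54" ∉ l) :
    l.foldl stepA (false, false, ra) = (false, false, ra) := by
  induction l with
  | nil => rfl
  | cons t r ih =>
    simp only [List.mem_cons, not_or] at h
    have ht : ¬ (t = "54") := fun e => h.1 e.symm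
    simp only [List.foldl_cons, stepA]
    rw [if_neg ht]
    simp only [Bool.false_and, Bool.false_eq_true, if_neg (fun h => h)]
    exact ih h.2

-- state (true,false,ra) is preserved while no '03' is seen
lemma foldTF_no03 (l : List String) (ra : Int) (h : "03" ∉ l) :
    l.foldl stepA (true, false, ra) = (true, false, ra) := by
  induction l with
  | nil => rfl
  | cons t r ih =>
    simp only [List.mem_cons, not_or] at h
    have ht : ¬ (t = "03") := fun e => h.1 e.symm
    by_cases h54 : t = "54"
    · simp only [List.foldl_cons, stepA, h54, if_pos rfl]
      exact ih h.2
    · simp only [List.foldl_cons, stepA]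
      rw [if_neg h54]
      simp only [ht, decide_false, Bool.and_false, Bool.false_and,
        Bool.false_eq_true, if_neg (fun h => h)]
      exact ih h.2

-- in state (true,true,ra) the result is 1 iff a '55' remains (else ra)
lemma foldTT (l : List String) (ra : Int) :
    (l.foldl stepA (true, true, ra)).2.2 = if "55" ∈ l then 1 else ra := by
  induction l generalizing ra with
  | nil => simp
  | cons t r ih =>
    simp only [List.foldl_cons, List.mem_cons]
    by_cases h55 : t = "55"
    · subst h55
      have hs : stepA (true, true, ra) "55" = (true, true, 1) := by
        simp [stepA]
      rw [hs, ih]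
      simp
    · have hne : ¬ ("55" = t) := fun e => h55 e.symm
      have hs : stepA (true, true, ra) t = (true, true, ra) := by
        by_cases h54 : t = "54"
        · simp [stepA, h54]
        · by_cases h03 : t = "03"
          · simp [stepA, h03]
          · simp [stepA, h54, h03, h55]
      rw [hs, ih]
      simp [hne]

-- drop past a decomposition point
lemma drop_past {α : Type} (pre suf : List α) (x : α) :
    (pre ++ x :: suf).drop (pre.length + 1) = suf := by
  have h1 : pre ++ x :: suf = (pre ++ [x]) ++ suf := by simp
  rw [h1]
  have hl : pre.length + 1 = (pre ++ [x]).length := by simp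
  rw [hl, List.drop_left]

-- core equivalence on the token list
lemma core_eq (toks : List String) :
    ((toks.foldl stepA (false, false, 0)).2.2 : Int) =
    (match PySem.List.index? toks "54" with
     | none => 0
     | some i =>
       match PySem.List.index? (toks.drop (i + 1)) "03" with
       | none => 0
       | some jr =>
         match PySem.List.index? (toks.drop (i + 1 + jr + 1)) "55" with
         | none => 0
         | some _ => (1 : Int)) := by
  cases h54 : PySem.List.index? toks "54" with
  | none =>
    have hmem : "54" ∉ toks := (PySem.List.index?_eq_none_iff _ _).1 h54
    rw [foldFF_no54 toks 0 hmem]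
  | some i =>
    obtain ⟨pre, suf, htoks, hlen, hpre⟩ := (PySem.List.index?_eq_some_iff _ _ _).1 h54
    subst htoks
    dsimp only
    have hdrop : (pre ++ "54" :: suf).drop (i + 1) = suf := by
      rw [← hlen]; exact drop_past pre suf "54"
    rw [hdrop]
    have hA : (pre ++ "54" :: suf).foldl stepA (false, false, 0) =
        suf.foldl stepA (true, false, 0) := by
      rw [List.foldl_append, foldFF_no54 pre 0 hpre]
      simp [stepA]
    rw [hA]
    cases h03 : PySem.List.index? suf "03" with
    | none =>
      have hmem : "03" ∉ suf := (PySem.List.index?_eq_none_iff _ _).1 h03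
      rw [foldTF_no03 suf 0 hmem]
    | some jr =>
      obtain ⟨p2, s2, hsuf, hlen2, hp2⟩ := (PySem.List.index?_eq_some_iff _ _ _).1 h03
      subst hsuf
      dsimp only
      have hdrop2 : ((pre ++ "54" :: (p2 ++ "03" :: s2)).drop (i + 1 + jr + 1)) = s2 := by
        have h1 : (pre ++ "54" :: (p2 ++ "03" :: s2)).drop (i + 1) = p2 ++ "03" :: s2 := by
          rw [← hlen]; exact drop_past pre _ "54"
        have h2 : i + 1 + jr + 1 = (i + 1) + (jr + 1) := by omega
        rw [h2, ← List.drop_drop, h1, ← hlen2]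
        exact drop_past p2 s2 "03"
      rw [hdrop2]
      have hB : (p2 ++ "03" :: s2).foldl stepA (true, false, 0) =
          s2.foldl stepA (true, true, 0) := by
        rw [List.foldl_append, foldTF_no03 p2 0 hp2]
        simp [stepA]
      rw [hB, foldTT]
      cases h55 : PySem.List.index? s2 "55" with
      | none =>
        have hmem : "55" ∉ s2 := (PySem.List.index?_eq_none_iff _ _).1 h55
        simp [hmem]
      | some k =>
        have hmem : "55" ∈ s2 := by
          have h := PySem.List.index?_isSome_iff (xs := s2) (v := "55")
          rw [h55] at h; simpa using h
        simp [hmem]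

-- ===== VERDICT (by name: the statement is the Claim_ definition above) =====
theorem rule_SUB2_spec : Claim_equal_rule_SUB2 := by
  intro block edges _ _
  unfold Spec_rule_SUB2 rule_SUB2 rule_SUB2_alt
  exact core_eq _
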